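-- pv_equiv track=rewrite | github.com/muji-4ok/bytes2line | bytes2line.py | closest_symbol_name
-- ===== SOURCE A (Python) =====
-- def closest_symbol_name(symbols: dict[int, str], target_offset: int) -> str | None:
--     best = None
--
--     for offset in symbols.keys():
--         if offset > target_offset:
--             continue
--
--         if best is None:
--             best = offset
--         elif target_offset - offset <= target_offset - best:
--             best = offset
--
--     return symbols[best] if best is not None else None
-- ===== SOURCE B (Python) =====
-- import bisect
--
--
-- def closest_symbol_name(symbols: dict[int, str], target_offset: int) -> str | None:
--     offs = sorted(symbols)
--     pos = bisect.bisect_right(offs, target_offset)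
--     if pos == 0:
--         return None
--     return symbols[offs[pos - 1]]
-- ===== Notes on version B (the rewrite author's own statement) =====
-- stated objective: alternative
-- what changed: Replaces the linear max-tracking scan over the dict keys with a sorted offset index queried by bisect_right (pos == 0 means no offset is <= target, otherwise offs[pos-1] is the closest one).
import Mathlib
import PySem

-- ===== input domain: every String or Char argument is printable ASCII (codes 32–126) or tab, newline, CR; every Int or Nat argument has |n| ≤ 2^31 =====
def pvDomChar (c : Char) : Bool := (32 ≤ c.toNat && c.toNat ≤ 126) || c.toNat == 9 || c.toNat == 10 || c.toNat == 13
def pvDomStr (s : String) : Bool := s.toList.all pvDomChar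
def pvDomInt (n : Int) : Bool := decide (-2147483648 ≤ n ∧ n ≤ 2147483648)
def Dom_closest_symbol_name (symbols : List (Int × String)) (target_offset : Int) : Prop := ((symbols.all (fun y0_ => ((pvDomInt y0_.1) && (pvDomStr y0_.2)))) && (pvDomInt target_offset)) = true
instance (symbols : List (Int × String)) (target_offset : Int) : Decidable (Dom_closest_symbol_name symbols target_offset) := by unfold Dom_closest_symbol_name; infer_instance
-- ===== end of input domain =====

-- B replaces A's linear max-tracking scan by a sorted offset index queried with bisect_right (alternative algorithm, not claimed faster).

-- ===== PORT A =====
-- the loop body of A: skip offsets > target, else keep the one closer to target (larger)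
def pvStepA (target_offset : Int) (best : Option Int) (offset : Int) : Option Int :=
  if offset > target_offset then best
  else
    match best with
    | none => some offset
    | some b => if target_offset - offset ≤ target_offset - b then some offset else best

def closest_symbol_name (symbols : List (Int × String)) (target_offset : Int) : Option String :=
  let d := PySem.Dict.ofList symbols
  match d.keys.foldl (pvStepA target_offset) none with
  | none => none
  | some b => d.get? b

-- ===== PORT B =====
def closest_symbol_name_alt (symbols : List (Int × String)) (target_offset : Int) : Option String :=
  let d := PySem.Dict.ofList symbols
  let offs := PySem.List.sorted d.keys (fun x => x) false
  let pos := PySem.List.bisectRight offs target_offset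
  if pos = 0 then none
  else
    match PySem.List.pyGet? offs ((pos : Int) - 1) with   -- offs[pos-1]; in range since 1 ≤ pos ≤ len
    | none => none
    | some m => d.get? m

-- ===== PRECONDITION & SPEC =====
def Spec_closest_symbol_name (symbols : List (Int × String)) (target_offset : Int) (out : Option String) : Prop := out = closest_symbol_name_alt symbols target_offset
instance (symbols : List (Int × String)) (target_offset : Int) (out : Option String) : Decidable (Spec_closest_symbol_name symbols target_offset out) := by unfold Spec_closest_symbol_name; infer_instance

-- ===== CLAIM (what is proved, stated in full; the proofs are below) =====
def Claim_equal_closest_symbol_name : Prop := ∀ (symbols : List (Int × String)) (target_offset : Int), Dom_closest_symbol_name symbols target_offset → Spec_closest_symbol_name symbols target_offset (closest_symbol_name symbols target_offset)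

-- ===== LEMMAS AND PROOFS =====

-- A's step, rewritten: the 'closer to target' test on eligible offsets is just the running maximum
lemma stepA_eq (t : Int) (b : Option Int) (o : Int) :
    pvStepA t b o = if o ≤ t then some (match b with | none => o | some b' => max b' o) else b := by
  unfold pvStepA
  rcases b with _ | b' <;> simp only [] <;> split_ifs <;>
    first
      | rfl
      | omega
      | (simp [max_def]; omega)

-- the fold never forgets a some-accumulator
lemma foldA_some (t : Int) : ∀ (l : List Int) (b : Int), ∃ m, l.foldl (pvStepA t) (some b) = some m := by
  intro l
  induction l with
  | nil => exact fun b => ⟨b, rfl⟩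
  | cons o l ih =>
    intro b
    rw [List.foldl_cons, stepA_eq]
    split_ifs with h
    · exact ih _
    · exact ih b

lemma foldA_mem (t : Int) : ∀ (l : List Int) (acc m : Option Int),
    l.foldl (pvStepA t) acc = m → m = acc ∨ (∃ v, m = some v ∧ v ∈ l ∧ v ≤ t) := by
  intro l
  induction l with
  | nil => intro acc m h; exact Or.inl h.symm
  | cons o l ih =>
    intro acc m h
    rw [List.foldl_cons, stepA_eq] at h
    split_ifs at h with ho
    · rcases ih _ m h with h1 | ⟨v, rfl, hv, hvt⟩
      · rcases acc with _ | b'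
        · exact Or.inr ⟨o, h1, by simp, ho⟩
        · subst h1
          rcases le_or_gt b' o with hbo | hbo
          · exact Or.inr ⟨max b' o, rfl, by simp [max_eq_right hbo], by simpa [max_eq_right hbo]⟩
          · exact Or.inl (by simp [max_eq_left (le_of_lt hbo)])
      · exact Or.inr ⟨v, rfl, List.mem_cons_of_mem _ hv, hvt⟩
    · rcases ih _ m h with h1 | ⟨v, rfl, hv, hvt⟩
      · exact Or.inl h1
      · exact Or.inr ⟨v, rfl, List.mem_cons_of_mem _ hv, hvt⟩

lemma foldA_ub (t : Int) : ∀ (l : List Int) (acc : Option Int) (m : Int),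
    l.foldl (pvStepA t) acc = some m → (∀ k ∈ l, k ≤ t → k ≤ m) ∧ (∀ b, acc = some b → b ≤ m) := by
  intro l
  induction l with
  | nil =>
    intro acc m h
    exact ⟨by simp, fun b hb => by simp [hb] at h; omega⟩
  | cons o l ih =>
    intro acc m h
    rw [List.foldl_cons, stepA_eq] at h
    split_ifs at h with ho
    · rcases ih _ m h with ⟨h1, h2⟩
      have hom : o ≤ m := by
        rcases acc with _ | b'
        · exact h2 o rfl
        · exact le_trans (le_max_right b' o) (h2 _ rfl)
      refine ⟨fun k hk hkt => ?_, fun b hb => ?_⟩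
      · rcases List.mem_cons.1 hk with rfl | hk
        · exact hom
        · exact h1 k hk hkt
      · subst hb; exact le_trans (le_max_left b o) (h2 _ rfl)
    · rcases ih _ m h with ⟨h1, h2⟩
      refine ⟨fun k hk hkt => ?_, h2⟩
      rcases List.mem_cons.1 hk with rfl | hk
      · omega
      · exact h1 k hk hkt

lemma foldA_none_of (t : Int) : ∀ (l : List Int), (∀ k ∈ l, ¬ k ≤ t) → l.foldl (pvStepA t) none = none := by
  intro l
  induction l with
  | nil => intro _; rfl
  | cons o l ih =>
    intro h
    rw [List.foldl_cons, stepA_eq]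
    rw [if_neg (h o (by simp))]
    exact ih (fun k hk => h k (List.mem_cons_of_mem _ hk))

lemma foldA_some_of (t : Int) : ∀ (l : List Int) (acc : Option Int) (k : Int), k ∈ l → k ≤ t →
    ∃ m, l.foldl (pvStepA t) acc = some m := by
  intro l
  induction l with
  | nil => intro _ _ h; simp at h
  | cons o l ih =>
    intro acc k hk hkt
    rw [List.foldl_cons, stepA_eq]
    rcases List.mem_cons.1 hk with rfl | hk
    · rw [if_pos hkt]
      rcases acc with _ | b'
      · exact foldA_some t l _
      · exact foldA_some t l _
    · split_ifs with ho
      · rcases acc with _ | b' <;> exact foldA_some t l _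
      · exact ih acc k hk hkt

-- A's running-maximum fold over the keys is exactly what bisect_right on the sorted keys finds
lemma foldA_eq_bisect (ks : List Int) (t : Int) :
    ks.foldl (pvStepA t) none =
      (if PySem.List.bisectRight (PySem.List.sorted ks (fun x => x) false) t = 0 then none
       else PySem.List.pyGet? (PySem.List.sorted ks (fun x => x) false)
              ((PySem.List.bisectRight (PySem.List.sorted ks (fun x => x) false) t : Int) - 1)) := by
  set offs := PySem.List.sorted ks (fun x => x) false with hoffs
  have hpw : List.Pairwise (fun a b => a ≤ b) offs := by
    simpa using PySem.List.sorted_pairwise ks (fun x => x)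
  obtain ⟨hlen, hle, hgt⟩ := PySem.List.bisectRight_spec offs t hpw
  set pos := PySem.List.bisectRight offs t with hpos
  by_cases h0 : pos = 0
  · -- no offset ≤ target: A's fold stays none, bisect position 0 gives none
    rw [if_pos h0]
    apply foldA_none_of
    intro k hk
    have hk' : k ∈ offs := (PySem.List.mem_sorted _ _ _ _).mpr hk
    obtain ⟨j, hj, rfl⟩ := List.mem_iff_getElem.1 hk'
    have := hgt j hj (by omega)
    omega
  · -- pos ≥ 1: offs[pos-1] is the greatest offset ≤ target, which is what A's fold keeps
    rw [if_neg h0]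
    have hpos1 : pos - 1 < offs.length := by omega
    have hmt : offs[pos - 1] ≤ t := hle (pos - 1) hpos1 (by omega)
    have hmem : offs[pos - 1] ∈ ks := (PySem.List.mem_sorted _ _ _ _).mp (List.getElem_mem hpos1)
    obtain ⟨v, hfold⟩ := foldA_some_of t ks none offs[pos - 1] hmem hmt
    rcases foldA_mem t ks none (some v) hfold with h1 | ⟨w, hw, hwmem, hwt⟩
    · simp at h1
    · have hvw : v = w := by simpa using hw
      rw [hvw] at hfold
      have hub := (foldA_ub t ks none w hfold).1
      have h1 : offs[pos - 1] ≤ w := hub _ hmem hmt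
      have h2 : w ≤ offs[pos - 1] := by
        have hv2 : w ∈ offs := (PySem.List.mem_sorted _ _ _ _).mpr hwmem
        obtain ⟨j, hj, rfl⟩ := List.mem_iff_getElem.1 hv2
        by_cases hjp : j < pos
        · exact PySem.List.sorted_id_getElem_mono (xs := ks) (by omega : j ≤ pos - 1) hpos1
        · have := hgt j hj (by omega)
          omega
      have hget : PySem.List.pyGet? offs ((pos : Int) - 1) = some offs[pos - 1] := by
        have hc : ((pos : Int) - 1) = ((pos - 1 : Nat) : Int) := by omega
        rw [hc, PySem.List.pyGet?_natCast]
        simp [hpos1]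
      rw [hfold, hget, le_antisymm h2 h1]

-- ===== VERDICT (by name: the statement is the Claim_ definition above) =====
theorem closest_symbol_name_spec : Claim_equal_closest_symbol_name := by
  intro symbols t _
  unfold Spec_closest_symbol_name closest_symbol_name closest_symbol_name_alt
  simp only [foldA_eq_bisect]
  split_ifs <;> rfl
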